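-- pv_equiv track=rewrite | github.com/Mat-O-Lab/ckanext-csvtocsvw | ckanext/csvtocsvw/tasks.py | chunky
-- ===== SOURCE A (Python) =====
-- import itertools
--
-- def chunky(items, num_items_per_chunk):
--     """
--     Breaks up a list of items into chunks - multiple smaller lists of items.
--     The last chunk is flagged up.
--
--     :param items: Size of each chunks
--     :type items: iterable
--     :param num_items_per_chunk: Size of each chunks
--     :type num_items_per_chunk: int
--
--     :returns: multiple tuples: (chunk, is_it_the_last_chunk)
--     :rtype: generator of (list, bool)
--     """
--     items_ = iter(items)
--     chunk = list(itertools.islice(items_, num_items_per_chunk))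
--     while chunk:
--         next_chunk = list(itertools.islice(items_, num_items_per_chunk))
--         chunk_is_the_last_one = not next_chunk
--         yield chunk, chunk_is_the_last_one
--         chunk = next_chunk
-- ===== SOURCE B (Python) =====
-- def chunky(items, num_items_per_chunk):
--     """Chunk items into lists of size num_items_per_chunk; flag the last chunk.
--
--     B: materialize once, then slice by index in a single arithmetic loop
--     (no buffered look-ahead chunk as in A)."""
--     seq = list(items)
--     n = num_items_per_chunk
--     if n <= 0:
--         return
--     i = 0
--     while i < len(seq):
--         yield seq[i:i + n], i + n >= len(seq)
--         i += n
-- ===== Notes on version B (the rewrite author's own statement) =====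
-- stated objective: alternative
-- what changed: A lazily pulls chunks from an iterator while buffering the next chunk to detect the end; B materializes the input once and slices it by an arithmetic index loop, flagging the last chunk by i+n >= len.
-- outside the precondition, e.g. on chunky([1, 2], -1): A raises ValueError, B returns []
import Mathlib
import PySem

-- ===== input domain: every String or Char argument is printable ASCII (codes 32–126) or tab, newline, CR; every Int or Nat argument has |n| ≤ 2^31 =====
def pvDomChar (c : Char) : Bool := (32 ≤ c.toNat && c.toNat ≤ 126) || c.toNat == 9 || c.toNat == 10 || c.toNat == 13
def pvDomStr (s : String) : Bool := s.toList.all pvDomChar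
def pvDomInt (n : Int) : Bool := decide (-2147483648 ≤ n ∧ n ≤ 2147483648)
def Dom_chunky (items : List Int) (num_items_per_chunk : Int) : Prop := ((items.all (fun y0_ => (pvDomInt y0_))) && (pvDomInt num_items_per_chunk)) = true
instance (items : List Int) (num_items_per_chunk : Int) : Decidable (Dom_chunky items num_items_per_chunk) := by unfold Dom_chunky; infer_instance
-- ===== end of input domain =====

-- B replaces A's buffered look-ahead over an iterator by a single index-arithmetic
-- loop over the materialized list (flag = i+n >= len); same cost, different decomposition.

-- ===== PORT A =====
-- while chunk: next_chunk = islice(n); yield (chunk, not next_chunk); chunk = next_chunk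
-- (islice with a nonnegative count n takes the next n elements = take/drop here;
--  negative counts make islice raise ValueError and are excluded by Pre_chunky)
def chunkyAux (n : Nat) (chunk rest : List Int) : List (List Int × Bool) :=
  if chunk = [] then []
  else
    (chunk, decide (rest.take n = [])) :: chunkyAux n (rest.take n) (rest.drop n)
termination_by 2 * rest.length + (if chunk = [] then 0 else 1)
decreasing_by
  rename_i h
  simp only [List.length_drop, if_neg h]
  by_cases ht : rest.take n = []
  · simp only [if_pos ht]
    omega
  · simp only [if_neg ht]
    rw [List.take_eq_nil_iff] at ht
    push_neg at ht
    have hlen : rest.length ≠ 0 := fun h0 => ht.2 (List.eq_nil_of_length_eq_zero h0)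
    omega

def chunky (items : List Int) (num_items_per_chunk : Int) : List (List Int × Bool) :=
  let n := num_items_per_chunk.toNat   -- islice count; Pre_ guarantees num_items_per_chunk ≥ 0
  chunkyAux n (items.take n) (items.drop n)

-- ===== PORT B =====
-- while i < len(seq): yield (seq[i:i+n], i+n >= len(seq)); i += n
-- (the '0 < n' part of the guard only makes the recursion total; the caller
--  only enters the loop with n > 0, exactly as Source B returns early when n <= 0)
def chunkyAltAux (seq : List Int) (n : Nat) (i : Nat) : List (List Int × Bool) :=
  if h : i < seq.length ∧ 0 < n then
    (PySem.List.slice seq (some (i : Int)) (some ((i : Int) + (n : Int))),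
      decide ((i : Int) + (n : Int) ≥ (seq.length : Int))) :: chunkyAltAux seq n (i + n)
  else []
termination_by seq.length - i
decreasing_by omega

def chunky_alt (items : List Int) (num_items_per_chunk : Int) : List (List Int × Bool) :=
  if num_items_per_chunk ≤ 0 then []
  else chunkyAltAux items num_items_per_chunk.toNat 0

-- ===== PRECONDITION & SPEC =====
-- Pre_ excludes num_items_per_chunk < 0, on which A raises ValueError (from islice) when consumed.
def Pre_chunky (items : List Int) (num_items_per_chunk : Int) : Prop :=
  0 ≤ num_items_per_chunk
instance (items : List Int) (num_items_per_chunk : Int) : Decidable (Pre_chunky items num_items_per_chunk) := by unfold Pre_chunky; infer_instance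

def pvWitness_chunky : List Int × Int := ([1, 2, 3, 4, 5], 2)

def Spec_chunky (items : List Int) (num_items_per_chunk : Int) (out : List (List Int × Bool)) : Prop := out = chunky_alt items num_items_per_chunk
instance (items : List Int) (num_items_per_chunk : Int) (out : List (List Int × Bool)) : Decidable (Spec_chunky items num_items_per_chunk out) := by unfold Spec_chunky; infer_instance

-- ===== CLAIM (what is proved, stated in full; the proofs are below) =====
def Claim_equal_chunky : Prop := ∀ (items : List Int) (num_items_per_chunk : Int), Dom_chunky items num_items_per_chunk → Pre_chunky items num_items_per_chunk → Spec_chunky items num_items_per_chunk (chunky items num_items_per_chunk)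

-- ===== LEMMAS AND PROOFS =====

-- Common reference shape both ports are reduced to.
def chunksSpec (n : Nat) (l : List Int) : List (List Int × Bool) :=
  if n = 0 ∨ l = [] then []
  else if l.length ≤ n then [(l, true)]
  else (l.take n, false) :: chunksSpec n (l.drop n)
termination_by l.length
decreasing_by
  rename_i h1 h2
  push_neg at h1 h2
  simp only [List.length_drop]
  omega

theorem auxA_eq (n : Nat) (hn : 0 < n) (l : List Int) :
    chunkyAux n (l.take n) (l.drop n) = chunksSpec n l := by
  rw [chunkyAux, chunksSpec]
  by_cases hl : l = []
  · simp [hl]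
  · have htk : l.take n ≠ [] := by
      intro h0
      rw [List.take_eq_nil_iff] at h0
      rcases h0 with h0 | h0
      · omega
      · exact hl h0
    by_cases hle : l.length ≤ n
    · have hd : l.drop n = [] := by
        apply List.eq_nil_of_length_eq_zero
        simp only [List.length_drop]
        omega
      have htl : l.take n = l := List.take_of_length_le hle
      rw [if_neg htk, hd, htl]
      simp [chunkyAux, hl, hle, hn.ne']
    · have hrec := auxA_eq n hn (l.drop n)
      rw [if_neg htk]
      have htk2 : (l.drop n).take n ≠ [] := by
        intro h0
        rw [List.take_eq_nil_iff] at h0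
        rcases h0 with h0 | h0
        · omega
        · have := congrArg List.length h0
          simp only [List.length_drop, List.length_nil] at this
          omega
      simp only [hrec, htk2, decide_eq_true_eq]
      simp [hl, hle, hn.ne', htk2]
termination_by l.length
decreasing_by
  simp only [List.length_drop]
  have : l.length ≠ 0 := fun h0 => hl (List.eq_nil_of_length_eq_zero h0)
  omega

theorem auxB_eq (n : Nat) (hn : 0 < n) (l : List Int) (i : Nat) :
    chunkyAltAux l n i = chunksSpec n (l.drop i) := by
  rw [chunkyAltAux, chunksSpec]
  by_cases hi : i < l.length
  · have hd : l.drop i ≠ [] := by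
      intro h0
      have := congrArg List.length h0
      simp only [List.length_drop, List.length_nil] at this
      omega
    have hlen : (l.drop i).length = l.length - i := by simp
    have hslice : PySem.List.slice l (some (i : Int)) (some ((i : Int) + (n : Int)))
        = (l.drop i).take n := PySem.List.slice_natCast_add l i n
    by_cases hle : l.length - i ≤ n
    · have hflag : ((i : Int) + (n : Int) ≥ (l.length : Int)) := by
        push_cast
        omega
      have htl : (l.drop i).take n = l.drop i := by
        apply List.take_of_length_le
        omega
      have hstop : chunkyAltAux l n (i + n) = [] := by
        rw [chunkyAltAux]
        have hc : ¬ (i + n < l.length ∧ 0 < n) := by omega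
        simp [hc]
      simp [hi, hn, hd, hslice, htl, hstop, hflag, hlen, hle, hn.ne']
    · have hflag : ¬ ((i : Int) + (n : Int) ≥ (l.length : Int)) := by
        push_cast
        omega
      have hrec := auxB_eq n hn l (i + n)
      have hdd : l.drop (i + n) = (l.drop i).drop n := by
        rw [List.drop_drop]
      rw [hrec, hdd]
      simp [hi, hn, hd, hslice, hflag, hlen, hle, hn.ne']
  · have hd : l.drop i = [] := by
      apply List.eq_nil_of_length_eq_zero
      simp only [List.length_drop]
      omega
    rw [hd]
    have hc : ¬ (i < l.length ∧ 0 < n) := by omega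
    simp [hc, chunksSpec]
termination_by l.length - i
decreasing_by omega

-- ===== VERDICT (by name: the statement is the Claim_ definition above) =====
theorem chunky_spec : Claim_equal_chunky := by
  intro items num _ hpre
  unfold Spec_chunky chunky chunky_alt
  unfold Pre_chunky at hpre
  by_cases h0 : num ≤ 0
  · have hz : num = 0 := le_antisymm h0 hpre
    subst hz
    simp [chunkyAux, h0]
  · push_neg at h0
    have hn : 0 < num.toNat := by omega
    rw [auxA_eq _ hn, auxB_eq _ hn]
    simp [not_le.mpr h0]
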